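-- pv_equiv track=rewrite | github.com/b4rd14/judge | Submissions/2/sam/1713878938/1713878938.py | ELMOS
-- ===== SOURCE A (Python) =====
-- def ELMOS(n):
--     if n == 0:
--         return 5
--     else:
--         if n % 2 == 0:
--             return ELMOS(n-1) - 21
--         else:
--             return ELMOS(n-1) ** 2
-- ===== SOURCE B (Python) =====
-- def ELMOS(n):
--     v = 5
--     for i in range(1, n + 1):
--         if i % 2 == 0:
--             v = v - 21
--         else:
--             v = v ** 2
--     return v
-- ===== Notes on version B (the rewrite author's own statement) =====
-- stated objective: alternative
-- what changed: Rebuilds the recurrence bottom-up with an iterative loop over range(1, n+1) instead of top-down recursion on n.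
import Mathlib
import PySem

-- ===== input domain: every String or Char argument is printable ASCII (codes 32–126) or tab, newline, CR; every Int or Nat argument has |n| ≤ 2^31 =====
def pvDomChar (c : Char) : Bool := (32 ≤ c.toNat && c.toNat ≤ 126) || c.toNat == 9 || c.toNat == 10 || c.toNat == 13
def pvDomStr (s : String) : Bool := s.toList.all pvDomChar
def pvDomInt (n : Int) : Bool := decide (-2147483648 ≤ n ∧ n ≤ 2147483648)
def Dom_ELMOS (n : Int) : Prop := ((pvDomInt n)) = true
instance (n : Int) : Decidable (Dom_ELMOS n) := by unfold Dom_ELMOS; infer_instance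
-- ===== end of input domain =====

-- B replaces the top-down recursion with a bottom-up loop over range(1, n+1); return value only.

-- ===== PORT A =====
-- A recurses on n; for n ≥ 0 the recursion is n → n-1 → … → 0, mirrored here by
-- structural recursion on n.toNat (for n < 0 Python never reaches the base case and
-- raises RecursionError, which Pre_ELMOS excludes).
def ELMOSrec : Nat → Int
  | 0 => 5
  | Nat.succ m =>
      if PySem.Int.mod ((m : Int) + 1) 2 == 0 then ELMOSrec m - 21
      else ELMOSrec m ^ 2

def ELMOS (n : Int) : Int := ELMOSrec n.toNat

-- ===== PORT B =====
def ELMOS_alt (n : Int) : Int :=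
  (PySem.List.pyRange 1 (n + 1) 1).foldl
    (fun v i => if PySem.Int.mod i 2 == 0 then v - 21 else v ^ 2) 5

-- ===== PRECONDITION & SPEC =====
-- A raises RecursionError on negative n (the recursion n-1, n-2, … never hits 0).
def Pre_ELMOS (n : Int) : Prop := 0 ≤ n
instance (n : Int) : Decidable (Pre_ELMOS n) := by unfold Pre_ELMOS; infer_instance
def pvWitness_ELMOS : Int := 3

def Spec_ELMOS (n : Int) (out : Int) : Prop := out = ELMOS_alt n
instance (n : Int) (out : Int) : Decidable (Spec_ELMOS n out) := by unfold Spec_ELMOS; infer_instance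

-- ===== CLAIM (what is proved, stated in full; the proofs are below) =====
def Claim_equal_ELMOS : Prop := ∀ (n : Int), Dom_ELMOS n → Pre_ELMOS n → Spec_ELMOS n (ELMOS n)

-- ===== LEMMAS AND PROOFS =====
theorem ELMOSrec_eq_fold (k : Nat) :
    ELMOSrec k = (PySem.List.pyRange 1 ((k : Int) + 1) 1).foldl
      (fun v i => if PySem.Int.mod i 2 == 0 then v - 21 else v ^ 2) 5 := by
  induction k with
  | zero => simp [ELMOSrec, PySem.List.pyRange_one_eq_nil (by norm_num : (1:Int) ≤ 1)]
  | succ m ih =>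
      have h : PySem.List.pyRange 1 ((m : Int) + 1 + 1) 1
          = PySem.List.pyRange 1 ((m : Int) + 1) 1 ++ [(m : Int) + 1] :=
        PySem.List.pyRange_one_succ_right (by omega)
      push_cast
      rw [h, List.foldl_append]
      simp only [List.foldl]
      rw [← ih]
      simp [ELMOSrec]

-- ===== VERDICT (by name: the statement is the Claim_ definition above) =====
theorem ELMOS_spec : Claim_equal_ELMOS := by
  intro n _ hpre
  unfold Spec_ELMOS ELMOS ELMOS_alt
  rw [ELMOSrec_eq_fold, Int.toNat_of_nonneg hpre]
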